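-- pv_equiv track=rewrite | github.com/wanawin/better-grid | pick3_touch_grid_app_v20_seedgrid_straights_roworder.py | compute_drought
-- ===== SOURCE A (Python) =====
-- DIGITS = [str(i) for i in range(10)]
--
-- def compute_drought(stream_nums: list[str], upto_exclusive: int, window: int | None = None) -> list[dict[str, int]]:
--     """drought[pos][digit] = draws since last seen for that digit at that position."""
--     if window is None:
--         start = 0
--     else:
--         start = max(0, upto_exclusive - int(window))
--
--     last_seen = [{d: None for d in DIGITS} for _ in range(3)]
--     for i in range(start, upto_exclusive):
--         rel = i - start
--         s = str(stream_nums[i]).zfill(3)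
--         for pos in range(3):
--             last_seen[pos][s[pos]] = rel
--
--     drought = []
--     for pos in range(3):
--         dct = {}
--         for d in DIGITS:
--             if last_seen[pos][d] is None:
--                 dct[d] = (upto_exclusive - start)
--             else:
--                 dct[d] = (upto_exclusive - start - 1) - last_seen[pos][d]
--         drought.append(dct)
--     return drought
-- ===== SOURCE B (Python) =====
-- DIGITS = [str(i) for i in range(10)]
--
-- def compute_drought(stream_nums, upto_exclusive, window=None):
--     """Single reverse pass: walk the window backwards and record the distance j
--     the first time each (position, digit) is met; unseen keys keep the window
--     length n that the dicts start from (no None sentinels, no second pass)."""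
--     if window is None:
--         start = 0
--     else:
--         start = max(0, upto_exclusive - int(window))
--     n = upto_exclusive - start
--     drought = [{d: n for d in DIGITS} for _ in range(3)]
--     for i in range(upto_exclusive - 1, start - 1, -1):
--         j = (upto_exclusive - 1) - i
--         s = stream_nums[i].zfill(3)
--         for pos in range(3):
--             c = s[pos]
--             if drought[pos].get(c) == n:
--                 drought[pos][c] = j
--     return drought
-- ===== Notes on version B (the rewrite author's own statement) =====
-- stated objective: simpler
-- what changed: A makes a forward pass storing last-seen indices with None sentinels and then a second transform pass converting them to distances; B makes a single reverse pass over the window that writes each (position, digit) distance directly the first time the digit is met, with the dicts pre-filled with the window length for never-seen digits.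
import Mathlib
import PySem

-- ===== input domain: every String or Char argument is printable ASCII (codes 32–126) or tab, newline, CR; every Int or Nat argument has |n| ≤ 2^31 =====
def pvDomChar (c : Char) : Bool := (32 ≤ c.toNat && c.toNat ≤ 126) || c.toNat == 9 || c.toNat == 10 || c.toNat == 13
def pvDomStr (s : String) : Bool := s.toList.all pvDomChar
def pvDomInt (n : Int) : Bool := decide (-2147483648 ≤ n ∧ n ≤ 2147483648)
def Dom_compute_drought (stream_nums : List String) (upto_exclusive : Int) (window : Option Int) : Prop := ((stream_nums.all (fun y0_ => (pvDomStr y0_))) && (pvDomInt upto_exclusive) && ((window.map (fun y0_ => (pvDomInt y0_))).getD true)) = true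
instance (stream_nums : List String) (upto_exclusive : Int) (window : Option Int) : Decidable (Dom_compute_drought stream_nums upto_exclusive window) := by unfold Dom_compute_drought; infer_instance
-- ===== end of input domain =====

-- B replaces A's forward last-seen pass plus None-sentinel post-transform by a single reverse
-- pass that writes the drought distances directly (objective: simpler; same cost).


-- DIGITS = [str(i) for i in range(10)]  (module constant shared by both programs)
def pvDIGITS : List String := List.map PySem.Int.toStr (PySem.List.pyRange 0 10 1)

-- ===== PORT A =====
-- last_seen[pos][d] can never miss for d in DIGITS, so Python's last_seen[pos][d] (KeyError
-- impossible here) is ported as getD _ none; the stream lookup uses pyGetD with a junk default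
-- that is only reachable where Python raises IndexError (excluded by Pre_).
def compute_drought (stream_nums : List String) (upto_exclusive : Int) (window : Option Int) : List (List (String × Int)) :=
  let start : Int := match window with | none => 0 | some w => max 0 (upto_exclusive - w)
  let last_seen0 : List (PySem.Dict String (Option Int)) :=
    (PySem.List.pyRange 0 3 1).map (fun _ =>
      pvDIGITS.foldl (fun d x => d.insert x (none : Option Int)) PySem.Dict.empty)
  let last_seen :=
    (PySem.List.pyRange start upto_exclusive 1).foldl (fun ls i =>
      let rel := i - start
      let s := PySem.Chars.zfill (PySem.List.pyGetD stream_nums i "").toList 3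
      (PySem.List.pyRange 0 3 1).foldl (fun ls2 pos =>
        ls2.set pos.toNat
          ((PySem.List.pyGetD ls2 pos PySem.Dict.empty).insert
            (String.ofList [PySem.List.pyGetD s pos ' ']) (some rel))) ls) last_seen0
  (PySem.List.pyRange 0 3 1).foldl (fun dr pos =>
    let lsp := PySem.List.pyGetD last_seen pos PySem.Dict.empty
    let dct := pvDIGITS.foldl (fun dct d =>
      match lsp.getD d none with
      | none => dct.insert d (upto_exclusive - start)
      | some r => dct.insert d ((upto_exclusive - start - 1) - r)) PySem.Dict.empty
    dr ++ [dct.items]) []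

-- ===== PORT B =====
def compute_drought_alt (stream_nums : List String) (upto_exclusive : Int) (window : Option Int) : List (List (String × Int)) :=
  let start : Int := match window with | none => 0 | some w => max 0 (upto_exclusive - w)
  let n : Int := upto_exclusive - start
  let drought0 : List (PySem.Dict String Int) :=
    (PySem.List.pyRange 0 3 1).map (fun _ =>
      pvDIGITS.foldl (fun d x => d.insert x n) PySem.Dict.empty)
  let drought :=
    (PySem.List.pyRange (upto_exclusive - 1) (start - 1) (-1)).foldl (fun dr i =>
      let j := (upto_exclusive - 1) - i
      let s := PySem.Chars.zfill (PySem.List.pyGetD stream_nums i "").toList 3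
      (PySem.List.pyRange 0 3 1).foldl (fun dr2 pos =>
        let c := String.ofList [PySem.List.pyGetD s pos ' ']
        let dpos := PySem.List.pyGetD dr2 pos PySem.Dict.empty
        if dpos.get? c == some n then dr2.set pos.toNat (dpos.insert c j) else dr2) dr) drought0
  drought.map PySem.Dict.items

-- ===== PRECONDITION & SPEC =====
-- Pre_ excludes exactly the inputs where A raises IndexError: a nonempty window
-- (upto_exclusive > start) reaching past the end of stream_nums.
def Pre_compute_drought (stream_nums : List String) (upto_exclusive : Int) (window : Option Int) : Prop :=
  upto_exclusive ≤ (stream_nums.length : Int) ∨ upto_exclusive ≤ 0 ∨ window.getD 1 ≤ 0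
instance (stream_nums : List String) (upto_exclusive : Int) (window : Option Int) : Decidable (Pre_compute_drought stream_nums upto_exclusive window) := by unfold Pre_compute_drought; infer_instance
def pvWitness_compute_drought : List String × Int × Option Int := (["123", "045"], 2, none)
def Spec_compute_drought (stream_nums : List String) (upto_exclusive : Int) (window : Option Int) (out : List (List (String × Int))) : Prop := out = compute_drought_alt stream_nums upto_exclusive window
instance (stream_nums : List String) (upto_exclusive : Int) (window : Option Int) (out : List (List (String × Int))) : Decidable (Spec_compute_drought stream_nums upto_exclusive window out) := by unfold Spec_compute_drought; infer_instance

-- ===== CLAIM (what is proved, stated in full; the proofs are below) =====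
def Claim_equal_compute_drought : Prop := ∀ (stream_nums : List String) (upto_exclusive : Int) (window : Option Int), Dom_compute_drought stream_nums upto_exclusive window → Pre_compute_drought stream_nums upto_exclusive window → Spec_compute_drought stream_nums upto_exclusive window (compute_drought stream_nums upto_exclusive window)

-- ===== LEMMAS AND PROOFS =====

lemma pvFoldInsertLast {ν : Type} (L : List Int) (key : Int → String) (val : Int → ν) :
    ∀ (d : PySem.Dict String ν) (k : String),
    (L.foldl (fun d i => d.insert (key i) (val i)) d).get? k
      = match L.reverse.find? (fun i => key i == k) with
        | some i => some (val i)
        | none => d.get? k := by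
  induction L with
  | nil => intro d k; rfl
  | cons x t ih =>
    intro d k
    simp only [List.foldl_cons, List.reverse_cons, List.find?_append, ih]
    cases hf : t.reverse.find? (fun i => key i == k) with
    | some i => simp [Option.or]
    | none =>
      by_cases hk : key x = k
      · have hb : (key x == k) = true := by simp [hk]
        simp [Option.or, List.find?, hb, hk, PySem.Dict.get?_insert_self]
      · have hb : (key x == k) = false := by simp [hk]
        simp [Option.or, List.find?, hb, PySem.Dict.get?_insert_of_ne _ _ (fun h => hk h.symm)]

lemma pvFoldCondFrozen (n : Int) (R : List Int) (key : Int → String) (val : Int → Int) :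
    ∀ (d : PySem.Dict String Int) (k : String) (v : Int), d.get? k = some v → v ≠ n →
    (R.foldl (fun d i => if d.get? (key i) == some n then d.insert (key i) (val i) else d) d).get? k
      = some v := by
  induction R with
  | nil => intro d k v hv _; simpa using hv
  | cons x t ih =>
    intro d k v hv hne
    simp only [List.foldl_cons]
    by_cases hk : key x = k
    · have : (d.get? (key x) == some n) = false := by
        rw [hk, hv]; simp; omega
      simp only [this, Bool.false_eq_true, if_false]
      exact ih d k v hv hne
    · by_cases hc : (d.get? (key x) == some n) = true
      · simp only [hc, if_true]
        exact ih _ k v (by rw [PySem.Dict.get?_insert_of_ne _ _ (fun h => hk h.symm)]; exact hv) hne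
      · simp only [hc]
        exact ih d k v hv hne

lemma pvFoldCondFirst (n : Int) (R : List Int) (key : Int → String) (val : Int → Int)
    (hval : ∀ i ∈ R, val i ≠ n) :
    ∀ (d : PySem.Dict String Int) (k : String), d.get? k = some n →
    (R.foldl (fun d i => if d.get? (key i) == some n then d.insert (key i) (val i) else d) d).get? k
      = match R.find? (fun i => key i == k) with
        | some i => some (val i)
        | none => some n := by
  induction R with
  | nil => intro d k h; simpa using h
  | cons x t ih =>
    intro d k h
    simp only [List.foldl_cons]
    by_cases hk : key x = k
    · have hc : (d.get? (key x) == some n) = true := by rw [hk, h]; simp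
      have hb : (key x == k) = true := by simp [hk]
      simp only [hc, if_true]
      have hg : ((d.insert (key x) (val x)).get? k) = some (val x) := by
        rw [← hk]; exact PySem.Dict.get?_insert_self _ _ _
      rw [pvFoldCondFrozen n t key val _ k (val x) hg (hval x List.mem_cons_self)]
      simp [List.find?, hb]
    · have hb : (key x == k) = false := by simp [hk]
      have hfind : (x :: t).find? (fun i => key i == k) = t.find? (fun i => key i == k) := by
        simp [List.find?, hb]
      rw [hfind]
      by_cases hc : (d.get? (key x) == some n) = true
      · simp only [hc, if_true]
        exact ih (fun i hi => hval i (List.mem_cons_of_mem _ hi)) _ k (by rw [PySem.Dict.get?_insert_of_ne _ _ (fun hh => hk hh.symm)]; exact h)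
      · simp only [hc]
        exact ih (fun i hi => hval i (List.mem_cons_of_mem _ hi)) d k h
  
lemma pvFoldInitGet {ν : Type} (l : List String) (v : ν) :
    ∀ (d : PySem.Dict String ν) (k : String),
    (l.foldl (fun d x => d.insert x v) d).get? k = if k ∈ l then some v else d.get? k := by
  induction l with
  | nil => intro d k; simp
  | cons x t ih =>
    intro d k
    simp only [List.foldl_cons, ih, List.mem_cons]
    by_cases hm : k ∈ t
    · simp [hm]
    · by_cases hk : k = x
      · simp [hk, PySem.Dict.get?_insert_self]
      · simp [hk, hm, PySem.Dict.get?_insert_of_ne _ _ hk]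

lemma pvFoldCondKeys (n : Int) (R : List Int) (key : Int → String) (val : Int → Int) :
    ∀ (d : PySem.Dict String Int),
    (R.foldl (fun d i => if d.get? (key i) == some n then d.insert (key i) (val i) else d) d).keys
      = d.keys := by
  induction R with
  | nil => intro d; rfl
  | cons x t ih =>
    intro d
    simp only [List.foldl_cons]
    by_cases hc : (d.get? (key x) == some n) = true
    · simp only [hc, if_true, ih]
      apply PySem.Dict.keys_insert_of_contains
      rw [PySem.Dict.contains_eq_isSome_get?]
      rcases beq_iff_eq.mp hc with h
      rw [h]; rfl
    · simp only [hc, Bool.false_eq_true, if_false, ih]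


lemma pvRange_rev (a b : Int) :
    PySem.List.pyRange (b - 1) (a - 1) (-1) = (PySem.List.pyRange a b 1).reverse := by
  unfold PySem.List.pyRange
  norm_num
  rcases lt_or_ge a b with h | h
  · have h1 : a - 1 < b - 1 := by omega
    simp only [if_pos h]
    apply List.ext_getElem
    · simp
    · intro i h1' h2'
      simp only [List.getElem_map, List.getElem_reverse, List.getElem_range, List.length_map,
        List.length_range] at *
      simp only [List.length_map, List.length_range] at h1'
      omega
  · have h1 : ¬ (a - 1 < b - 1) := by omega
    simp [if_neg (by omega : ¬ a < b)]

lemma pvPerPos (u start : Int) (key : Int → String) :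
    (pvDIGITS.foldl (fun dct d =>
        match ((PySem.List.pyRange start u 1).foldl
                (fun d2 i => d2.insert (key i) (some (i - start)))
                (pvDIGITS.foldl (fun d x => d.insert x (none : Option Int)) PySem.Dict.empty)).getD d none with
        | none => dct.insert d (u - start)
        | some r => dct.insert d ((u - start - 1) - r)) PySem.Dict.empty).items
    = ((PySem.List.pyRange (u - 1) (start - 1) (-1)).foldl
        (fun d2 i => if d2.get? (key i) == some (u - start) then d2.insert (key i) ((u - 1) - i) else d2)
        (pvDIGITS.foldl (fun d x => d.insert x (u - start)) PySem.Dict.empty)).items := by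
  rw [pvRange_rev start u]
  set L := PySem.List.pyRange start u 1 with hL
  set lsA := L.foldl (fun d2 i => d2.insert (key i) (some (i - start)))
      (pvDIGITS.foldl (fun d x => d.insert x (none : Option Int)) PySem.Dict.empty) with hlsA
  set finB := L.reverse.foldl
      (fun d2 i => if d2.get? (key i) == some (u - start) then d2.insert (key i) ((u - 1) - i) else d2)
      (pvDIGITS.foldl (fun d x => d.insert x (u - start)) PySem.Dict.empty) with hfinB
  -- A's output dict is a fresh-key build over pvDIGITS
  have hfunA : (fun (dct : PySem.Dict String Int) d =>
      match lsA.getD d none with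
      | none => dct.insert d (u - start)
      | some r => dct.insert d ((u - start - 1) - r))
      = (fun dct d => dct.insert d (match lsA.getD d none with
          | none => u - start
          | some r => (u - start - 1) - r)) := by
    funext dct d; cases lsA.getD d none <;> rfl
  rw [hfunA]
  rw [PySem.Dict.items_foldl_insert_fresh pvDIGITS (fun d => d) _ PySem.Dict.empty
      (by intro a _; rfl) (by decide)]
  -- B's final dict: keys are pvDIGITS, items via getD
  have hkeys : finB.keys = pvDIGITS := by
    rw [hfinB, pvFoldCondKeys]
    rw [PySem.Dict.keys_foldl_insert pvDIGITS (fun _ _ => u - start) PySem.Dict.empty]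
    decide
  have hnodup : finB.keys.Nodup := by rw [hkeys]; decide
  rw [PySem.Dict.items_eq_map_keys finB hnodup 0, hkeys]
  rw [show (PySem.Dict.empty : PySem.Dict String Int).items = [] from rfl, List.nil_append]
  apply List.map_congr_left
  intro d hd
  -- B's value at d
  have hinitB : (pvDIGITS.foldl (fun d x => d.insert x (u - start)) PySem.Dict.empty).get? d
      = some (u - start) := by
    rw [pvFoldInitGet]; simp [hd]
  have hval : ∀ i ∈ L.reverse, (u - 1) - i ≠ u - start := by
    intro i hi
    rw [List.mem_reverse, hL, PySem.List.mem_pyRange_one] at hi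
    omega
  have hB := pvFoldCondFirst (u - start) L.reverse key (fun i => (u - 1) - i) hval _ d hinitB
  -- A's value at d
  have hA := pvFoldInsertLast L key (fun i => some (i - start))
      (pvDIGITS.foldl (fun d x => d.insert x (none : Option Int)) PySem.Dict.empty) d
  have hinitA : (pvDIGITS.foldl (fun d x => d.insert x (none : Option Int)) PySem.Dict.empty).get? d
      = some none := by
    rw [pvFoldInitGet]; simp [hd]
  cases hf : L.reverse.find? (fun i => key i == d) with
  | some i =>
    have hiL : i ∈ L := by
      have := List.mem_of_find?_eq_some hf
      rwa [List.mem_reverse] at this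
    rw [hL, PySem.List.mem_pyRange_one] at hiL
    rw [hf] at hA hB
    simp only at hA hB
    rw [← hlsA] at hA
    have : lsA.getD d none = some (i - start) := PySem.Dict.getD_of_get?_eq_some _ _ hA
    rw [this]
    rw [← hfinB] at hB
    have : finB.getD d 0 = (u - 1) - i := PySem.Dict.getD_of_get?_eq_some _ _ hB
    rw [this]
    simp only [Prod.mk.injEq, true_and]
    omega
  | none =>
    rw [hf, hinitA] at hA
    rw [hf] at hB
    simp only at hA hB
    rw [← hlsA] at hA
    have h1 : lsA.getD d none = none := PySem.Dict.getD_of_get?_eq_some _ _ hA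
    rw [h1]
    rw [← hfinB] at hB
    have h2 : finB.getD d 0 = u - start := PySem.Dict.getD_of_get?_eq_some _ _ hB
    rw [h2]

lemma pvSplit3 {α : Type} (L : List Int) (F : List α → Int → List α)
    (f g h : α → Int → α)
    (hF : ∀ a b c i, F [a, b, c] i = [f a i, g b i, h c i]) :
    ∀ a b c, L.foldl F [a, b, c] = [L.foldl f a, L.foldl g b, L.foldl h c] := by
  induction L with
  | nil => intro a b c; rfl
  | cons x t ih => intro a b c; simp only [List.foldl_cons, hF]; exact ih _ _ _

def pvKey (sn : List String) (pos i : Int) : String :=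
  String.ofList [PySem.List.pyGetD (PySem.Chars.zfill (PySem.List.pyGetD sn i "").toList 3) pos ' ']


lemma pvGet3_0 {α : Type} (x y z d : α) : PySem.List.pyGetD [x, y, z] 0 d = x := rfl
lemma pvGet3_1 {α : Type} (x y z d : α) : PySem.List.pyGetD [x, y, z] 1 d = y := rfl
lemma pvGet3_2 {α : Type} (x y z d : α) : PySem.List.pyGetD [x, y, z] 2 d = z := rfl

lemma pvStepB (s : List Char) (n j : Int) (a b c : PySem.Dict String Int) :
    (PySem.List.pyRange 0 3 1).foldl (fun dr2 pos =>
      let c' := String.ofList [PySem.List.pyGetD s pos ' ']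
      let dpos := PySem.List.pyGetD dr2 pos PySem.Dict.empty
      if dpos.get? c' == some n then dr2.set pos.toNat (dpos.insert c' j) else dr2) [a, b, c]
    = [(if a.get? (String.ofList [PySem.List.pyGetD s 0 ' ']) == some n then
          a.insert (String.ofList [PySem.List.pyGetD s 0 ' ']) j else a),
       (if b.get? (String.ofList [PySem.List.pyGetD s 1 ' ']) == some n then
          b.insert (String.ofList [PySem.List.pyGetD s 1 ' ']) j else b),
       (if c.get? (String.ofList [PySem.List.pyGetD s 2 ' ']) == some n then
          c.insert (String.ofList [PySem.List.pyGetD s 2 ' ']) j else c)] := by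
  rw [show PySem.List.pyRange 0 3 1 = [0, 1, 2] from rfl]
  simp only [List.foldl_cons, List.foldl_nil]
  generalize String.ofList [PySem.List.pyGetD s (0:Int) ' '] = k0
  generalize String.ofList [PySem.List.pyGetD s (1:Int) ' '] = k1
  generalize String.ofList [PySem.List.pyGetD s (2:Int) ' '] = k2
  by_cases h0 : (a.get? k0 == some n) = true <;>
  by_cases h1 : (b.get? k1 == some n) = true <;>
  by_cases h2 : (c.get? k2 == some n) = true <;>
    simp [h0, h1, h2, PySem.List.pyGetD, PySem.List.pyGet?, PySem.List.pyIdx?]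

lemma pvMain (sn : List String) (u : Int) (w : Option Int) :
    compute_drought sn u w = compute_drought_alt sn u w := by
  unfold compute_drought compute_drought_alt
  simp only []
  generalize (match w with | none => (0:Int) | some v => max 0 (u - v)) = start
  have h3 : PySem.List.pyRange 0 3 1 = [0, 1, 2] := rfl
  rw [h3]
  simp only [List.map_cons, List.map_nil]
  rw [pvSplit3 (PySem.List.pyRange start u 1) _
      (fun d i => d.insert (pvKey sn 0 i) (some (i - start)))
      (fun d i => d.insert (pvKey sn 1 i) (some (i - start)))
      (fun d i => d.insert (pvKey sn 2 i) (some (i - start)))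
      (fun a b c i => rfl)]
  rw [pvSplit3 (PySem.List.pyRange (u - 1) (start - 1) (-1)) _
      (fun d i => if d.get? (pvKey sn 0 i) == some (u - start) then d.insert (pvKey sn 0 i) ((u - 1) - i) else d)
      (fun d i => if d.get? (pvKey sn 1 i) == some (u - start) then d.insert (pvKey sn 1 i) ((u - 1) - i) else d)
      (fun d i => if d.get? (pvKey sn 2 i) == some (u - start) then d.insert (pvKey sn 2 i) ((u - 1) - i) else d)
      (fun a b c i => pvStepB (PySem.Chars.zfill (PySem.List.pyGetD sn i "").toList 3) (u - start) ((u - 1) - i) a b c)]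
  simp only [List.foldl_cons, List.foldl_nil, List.map_cons, List.map_nil, List.nil_append,
    pvGet3_0, pvGet3_1, pvGet3_2, List.cons_append, List.nil_append, List.cons.injEq, and_true]
  exact ⟨pvPerPos u start (pvKey sn 0), pvPerPos u start (pvKey sn 1), pvPerPos u start (pvKey sn 2)⟩

-- ===== VERDICT (by name: the statement is the Claim_ definition above) =====
theorem compute_drought_spec : Claim_equal_compute_drought := by
  intro stream_nums upto_exclusive window _ _
  unfold Spec_compute_drought
  exact pvMain stream_nums upto_exclusive window
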